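-- pv_equiv track=rewrite | github.com/garfix/richard | richard/core/atoms.py | unification_binding
-- ===== SOURCE A (Python) =====
-- def unification_binding(old_binding: dict, new_binding: dict) -> dict|None:
--     if old_binding is None:
--         return None
--     if new_binding is None:
--         return None
--
--     for key, value in new_binding.items():
--         if key in old_binding:
--             if old_binding[key] != value:
--                 return None
--
--     return old_binding | new_binding
-- ===== SOURCE B (Python) =====
-- def unification_binding(old_binding: dict, new_binding: dict) -> dict | None:
--     if old_binding is None or new_binding is None:
--         return None
--     return _merge(dict(old_binding), list(new_binding.items()))
--
--
-- def _merge(acc: dict, items: list) -> dict | None: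
--     if not items:
--         return acc
--     k, v = items[0]
--     if acc.get(k, v) != v:
--         return None
--     acc[k] = v
--     return _merge(acc, items[1:])
-- ===== Notes on version B (the rewrite author's own statement) =====
-- stated objective: alternative
-- what changed: B replaces A's staged iterative check-then-union (scan all of new_binding for conflicts, then compute old|new) by a recursive fused single pass: it copies old_binding and recurses over new_binding's items, comparing each item against the evolving accumulator via get-with-default and inserting it immediately, so no separate union step exists. Pre_ only excludes Lean association lists whose new_binding keys repeat, which represent no Python dict (dict keys are unique), so no Python input is excluded.
import Mathlib
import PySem

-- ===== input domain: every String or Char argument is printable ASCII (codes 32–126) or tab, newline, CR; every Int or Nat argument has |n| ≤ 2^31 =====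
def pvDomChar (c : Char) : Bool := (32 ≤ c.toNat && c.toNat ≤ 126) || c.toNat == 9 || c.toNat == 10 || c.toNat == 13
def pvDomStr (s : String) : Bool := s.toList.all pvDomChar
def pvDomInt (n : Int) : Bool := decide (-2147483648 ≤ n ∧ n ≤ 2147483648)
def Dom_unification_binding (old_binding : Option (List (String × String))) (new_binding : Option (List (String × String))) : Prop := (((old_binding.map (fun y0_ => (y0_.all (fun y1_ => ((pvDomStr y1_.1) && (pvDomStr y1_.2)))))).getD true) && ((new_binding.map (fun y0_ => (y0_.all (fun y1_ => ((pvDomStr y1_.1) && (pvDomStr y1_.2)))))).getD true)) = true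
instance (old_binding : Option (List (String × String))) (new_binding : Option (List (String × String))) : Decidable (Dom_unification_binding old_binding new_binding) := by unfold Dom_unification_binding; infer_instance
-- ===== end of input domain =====

-- B fuses the conflict check and the merge into one recursive pass over new_binding's items,
-- replacing A's staged check-then-union; same cost, different decomposition.

-- ===== PORT A =====
-- the 'for key, value in new_binding.items(): …' loop with its early 'return None'
def unifCheckA (dOld : PySem.Dict String String) : List (String × String) → Bool
  | [] => true
  | (key, value) :: rest =>
    if dOld.contains key then
      if dOld.get? key ≠ some value then false
      else unifCheckA dOld rest
    else unifCheckA dOld rest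

def unification_binding (old_binding : Option (List (String × String))) (new_binding : Option (List (String × String))) : Option (List (String × String)) :=
  match old_binding with
  | none => none
  | some ob =>
    match new_binding with
    | none => none
    | some nb =>
      let dOld := PySem.Dict.mk ob
      if unifCheckA dOld nb then some ((dOld.update nb).items) else none

-- ===== PORT B =====
-- Source B's _merge: recurse over the remaining items, checking against and extending the accumulator
def unifMergeB (acc : PySem.Dict String String) : List (String × String) → Option (List (String × String))
  | [] => some acc.items
  | (k, v) :: rest =>
    if acc.getD k v ≠ v then none
    else unifMergeB (acc.insert k v) rest

def unification_binding_alt (old_binding : Option (List (String × String))) (new_binding : Option (List (String × String))) : Option (List (String × String)) :=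
  match old_binding, new_binding with
  | some ob, some nb => unifMergeB (PySem.Dict.mk ob) nb
  | _, _ => none

-- ===== PRECONDITION & SPEC =====
-- Pre_ excludes only association lists whose keys repeat in new_binding: they represent no
-- Python dict (dict keys are unique), so no actual Python input is excluded.
def Pre_unification_binding (_old_binding : Option (List (String × String))) (new_binding : Option (List (String × String))) : Prop :=
  ((new_binding.getD []).map Prod.fst).Nodup
instance (old_binding : Option (List (String × String))) (new_binding : Option (List (String × String))) : Decidable (Pre_unification_binding old_binding new_binding) := by unfold Pre_unification_binding; infer_instance

def pvWitness_unification_binding : (Option (List (String × String))) × (Option (List (String × String))) :=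
  (some [("a", "1"), ("b", "2")], some [("b", "2"), ("c", "3")])

def Spec_unification_binding (old_binding : Option (List (String × String))) (new_binding : Option (List (String × String))) (out : Option (List (String × String))) : Prop := out = unification_binding_alt old_binding new_binding
instance (old_binding : Option (List (String × String))) (new_binding : Option (List (String × String))) (out : Option (List (String × String))) : Decidable (Spec_unification_binding old_binding new_binding out) := by unfold Spec_unification_binding; infer_instance

-- ===== CLAIM (what is proved, stated in full; the proofs are below) =====
def Claim_equal_unification_binding : Prop := ∀ (old_binding : Option (List (String × String))) (new_binding : Option (List (String × String))), Dom_unification_binding old_binding new_binding → Pre_unification_binding old_binding new_binding → Spec_unification_binding old_binding new_binding (unification_binding old_binding new_binding)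

-- ===== LEMMAS AND PROOFS =====

-- B's fused pass equals A's check-then-update, for any accumulator that agrees with dOld on
-- the keys still to be processed (the induction carries this invariant through the inserts).
theorem unifMergeB_eq (nb : List (String × String)) :
    ∀ (acc d : PySem.Dict String String),
    (nb.map Prod.fst).Nodup →
    (∀ k, k ∈ nb.map Prod.fst → acc.get? k = d.get? k) →
    unifMergeB acc nb = if unifCheckA d nb then some ((acc.update nb).items) else none := by
  induction nb with
  | nil => intro acc d _ _; simp [unifMergeB, unifCheckA, PySem.Dict.update]
  | cons p rest ih =>
    obtain ⟨k, v⟩ := p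
    intro acc d hnd hagree
    have hk : acc.get? k = d.get? k := hagree k (by simp)
    rw [List.map_cons] at hnd
    have hndr : (rest.map Prod.fst).Nodup := (List.nodup_cons.mp hnd).2
    have hknotin : k ∉ rest.map Prod.fst := (List.nodup_cons.mp hnd).1
    have hgetD : acc.getD k v = (d.get? k).getD v := by
      rw [PySem.Dict.getD_eq_get?_getD, hk]
    simp only [unifMergeB, unifCheckA]
    by_cases hc : d.contains k
    · have hsome : (d.get? k).isSome := by
        rw [← PySem.Dict.contains_eq_isSome_get?]; exact hc
      obtain ⟨w, hw⟩ := Option.isSome_iff_exists.mp hsome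
      by_cases hv : w = v
      · -- no conflict at the head
        have hne : ¬ acc.getD k v ≠ v := by rw [hgetD, hw, hv]; simp
        rw [if_neg hne, hc] at *
        simp only [hw, hv]
        have : ¬ some v ≠ some v := by simp
        rw [if_neg this]
        rw [ih (acc.insert k v) d hndr ?_]
        · have hupd : acc.update ((k, v) :: rest) = (acc.insert k v).update rest := rfl
          rw [hupd]; simp
        · intro k' hk'
          have hne' : k' ≠ k := fun h => hknotin (h ▸ hk')
          rw [PySem.Dict.get?_insert_of_ne acc v hne', hagree k' (by simp [hk'])]
      · -- conflict at the head: both return none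
        have hne : acc.getD k v ≠ v := by rw [hgetD, hw]; simpa using hv
        rw [if_pos hne]
        have : d.get? k ≠ some v := by rw [hw]; simpa using hv
        simp [hc, this]
    · -- k not in d: d.get? k = none, so acc.getD k v = v; insert and recurse
      have hnone : d.get? k = none := by
        rcases h : d.get? k with _ | w
        · rfl
        · exact absurd (by rw [PySem.Dict.contains_eq_isSome_get?, h]; rfl) hc
      have hne : ¬ acc.getD k v ≠ v := by rw [hgetD, hnone]; simp
      rw [if_neg hne]
      simp only [hc]
      rw [ih (acc.insert k v) d hndr ?_]
      · have hupd : acc.update ((k, v) :: rest) = (acc.insert k v).update rest := rfl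
        rw [hupd]; simp
      · intro k' hk'
        have hne' : k' ≠ k := fun h => hknotin (h ▸ hk')
        rw [PySem.Dict.get?_insert_of_ne acc v hne', hagree k' (by simp [hk'])]

-- ===== VERDICT (by name: the statement is the Claim_ definition above) =====
theorem unification_binding_spec : Claim_equal_unification_binding := by
  intro old_binding new_binding _ hpre
  unfold Spec_unification_binding unification_binding unification_binding_alt
  match old_binding, new_binding with
  | none, _ => rfl
  | some ob, none => rfl
  | some ob, some nb =>
    have hpre' : (nb.map Prod.fst).Nodup := hpre
    show (if unifCheckA (PySem.Dict.mk ob) nb then some (((PySem.Dict.mk ob).update nb)).items else none) = unifMergeB (PySem.Dict.mk ob) nb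
    rw [unifMergeB_eq nb (PySem.Dict.mk ob) (PySem.Dict.mk ob) hpre' (fun _ _ => rfl)]
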